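-- pv_equiv track=rewrite | github.com/StTraeger/advent-of-code-2021 | day3/solution.py | find_most_and_least_digit
-- ===== SOURCE A (Python) =====
-- import collections
--
-- def find_most_and_least_digit(list_of_numbers, return_if_equal=None):
--     list_of_digits = []
--     for i in range(len(list_of_numbers)):
--         list_of_digits.append(list_of_numbers[i])
--     most_common_digits = collections.Counter(list_of_digits).most_common()
--     if len(most_common_digits) == 1:
--         return most_common_digits[0][1], most_common_digits[0][1]
--     if most_common_digits[0][1] == most_common_digits[1][1] and return_if_equal:
--         return return_if_equal, return_if_equal
--     return most_common_digits[0][0], most_common_digits[-1][0]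
-- ===== SOURCE B (Python) =====
-- def find_most_and_least_digit(list_of_numbers, return_if_equal=None):
--     counts = {}
--     for x in list_of_numbers:
--         counts[x] = counts.get(x, 0) + 1
--     items = list(counts.items())
--     max_k, max_c = items[0]
--     min_k, min_c = items[0]
--     tied = False
--     for k, c in items[1:]:
--         if c > max_c:
--             max_k, max_c, tied = k, c, False
--         elif c == max_c:
--             tied = True
--         if c <= min_c:
--             min_k, min_c = k, c
--     if tied and return_if_equal:
--         return return_if_equal, return_if_equal
--     return max_k, min_k
-- ===== Notes on version B (the rewrite author's own statement) =====
-- stated objective: alternative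
-- what changed: B replaces Counter(...).most_common() (a sort of the count items) by a single pass over the count items that tracks the first-inserted maximum-count key, the last-inserted minimum-count key and a tie flag, reproducing most_common()'s stable tie-breaking without sorting.
-- outside the precondition, e.g. on find_most_and_least_digit(['5'], None): A returns (1, 1), B returns ('5', '5'); on find_most_and_least_digit([], None): A raises IndexError, B raises IndexError
import Mathlib
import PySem

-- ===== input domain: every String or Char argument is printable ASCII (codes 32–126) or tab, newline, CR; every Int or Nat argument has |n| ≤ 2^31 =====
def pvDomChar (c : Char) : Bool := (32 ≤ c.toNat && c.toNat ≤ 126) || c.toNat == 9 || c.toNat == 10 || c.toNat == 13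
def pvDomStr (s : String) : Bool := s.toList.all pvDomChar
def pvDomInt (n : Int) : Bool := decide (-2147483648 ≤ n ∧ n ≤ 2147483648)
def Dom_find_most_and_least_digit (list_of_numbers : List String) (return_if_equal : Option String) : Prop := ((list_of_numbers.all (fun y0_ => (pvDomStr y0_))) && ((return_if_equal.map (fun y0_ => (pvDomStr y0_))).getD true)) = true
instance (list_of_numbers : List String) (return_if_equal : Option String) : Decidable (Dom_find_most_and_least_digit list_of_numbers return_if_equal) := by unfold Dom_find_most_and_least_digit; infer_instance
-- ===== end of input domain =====

-- B replaces Counter(...).most_common() and its sort by one pass over the count items tracking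
-- the first-inserted maximum, last-inserted minimum and a tie flag (objective: alternative, no sort).
-- ===== PORT A =====
-- truthiness of the Python `return_if_equal` argument (None and "" are falsy)
def pvTruthy (o : Option String) : Bool :=
  match o with
  | none => false
  | some s => !(s == "")

def find_most_and_least_digit (list_of_numbers : List String) (return_if_equal : Option String) : String × String :=
  let list_of_digits :=
    (PySem.List.pyRange 0 (PySem.List.len list_of_numbers) 1).foldl
      (fun acc i => acc ++ [PySem.List.pyGetD list_of_numbers i ""]) []
  let most_common_digits :=
    PySem.List.sorted (PySem.Dict.counter list_of_digits).items (fun p => p.2) true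
  if most_common_digits.length == 1 then
    ("", "")  -- Python returns (count, count) here, an int pair outside the declared type; excluded by Pre_
  else
    -- indexing [0]/[1] raises IndexError on an empty list; excluded by Pre_
    let c0 := PySem.List.pyGetD most_common_digits 0 ("", 0)
    let c1 := PySem.List.pyGetD most_common_digits 1 ("", 0)
    if c0.2 == c1.2 && pvTruthy return_if_equal then
      (return_if_equal.getD "", return_if_equal.getD "")
    else
      (c0.1, (PySem.List.pyGetD most_common_digits (-1) ("", 0)).1)

-- ===== PORT B =====
-- the body of Source B's second loop: update (max_k, max_c, min_k, min_c, tied) with one item (k, c)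
def pvStep (st : String × Int × String × Int × Bool) (kc : String × Int) : String × Int × String × Int × Bool :=
  let (mk, mc, nk, nc, tied) := st
  let (k, c) := kc
  let (mk, mc, tied) :=
    if mc < c then (k, c, false)
    else if c == mc then (mk, mc, true)
    else (mk, mc, tied)
  let (nk, nc) := if c ≤ nc then (k, c) else (nk, nc)
  (mk, mc, nk, nc, tied)

def find_most_and_least_digit_alt (list_of_numbers : List String) (return_if_equal : Option String) : String × String :=
  let counts := list_of_numbers.foldl (fun d x => d.insert x (d.getD x 0 + 1)) PySem.Dict.empty
  let items := counts.items
  let h := items.headD ("", 0)  -- Source B's items[0]: IndexError on an empty dict, excluded by Pre_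
  let st := (items.drop 1).foldl pvStep (h.1, h.2, h.1, h.2, false)
  if st.2.2.2.2 && pvTruthy return_if_equal then
    (return_if_equal.getD "", return_if_equal.getD "")
  else
    (st.1, st.2.2.1)

-- ===== PRECONDITION & SPEC =====
-- Pre_ excludes the empty list (both programs raise IndexError) and lists with exactly one distinct
-- element, where A returns the COUNT twice — an int pair, not a value of the declared String × String type.
def Pre_find_most_and_least_digit (list_of_numbers : List String) (return_if_equal : Option String) : Prop :=
  2 ≤ (PySem.Set.ofList list_of_numbers).length
instance (list_of_numbers : List String) (return_if_equal : Option String) : Decidable (Pre_find_most_and_least_digit list_of_numbers return_if_equal) := by unfold Pre_find_most_and_least_digit; infer_instance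

def pvWitness_find_most_and_least_digit : List String × Option String := (["1", "0", "1"], some "x")

def Spec_find_most_and_least_digit (list_of_numbers : List String) (return_if_equal : Option String) (out : String × String) : Prop := out = find_most_and_least_digit_alt list_of_numbers return_if_equal
instance (list_of_numbers : List String) (return_if_equal : Option String) (out : String × String) : Decidable (Spec_find_most_and_least_digit list_of_numbers return_if_equal out) := by unfold Spec_find_most_and_least_digit; infer_instance

-- ===== CLAIM (what is proved, stated in full; the proofs are below) =====
def Claim_equal_find_most_and_least_digit : Prop := ∀ (list_of_numbers : List String) (return_if_equal : Option String), Dom_find_most_and_least_digit list_of_numbers return_if_equal → Pre_find_most_and_least_digit list_of_numbers return_if_equal → Spec_find_most_and_least_digit list_of_numbers return_if_equal (find_most_and_least_digit list_of_numbers return_if_equal)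

-- ===== LEMMAS AND PROOFS =====

def pvStat (s : List (String × Int)) : String × Int × String × Int × Bool :=
  match s with
  | [] => ("", 0, "", 0, false)
  | a :: rest =>
    (a.1, a.2, (s.getLastD ("", 0)).1, (s.getLastD ("", 0)).2,
      match rest with
      | [] => false
      | b :: _ => a.2 == b.2)
theorem pv_getLastD_mem {α : Type} (d : α) (s : List α) (h : s ≠ []) : s.getLastD d ∈ s := by
  cases s with
  | nil => simp at h
  | cons a t =>
    have := List.getLast_mem (l := a :: t) (by simp)
    simp [List.getLastD_eq_getLast?, List.getLast?_eq_some_getLast (l := a :: t) (by simp)]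
theorem pv_getLastD_cons_ne {α : Type} (d y : α) (l : List α) (h : l ≠ []) :
    (y :: l).getLastD d = l.getLastD d := by
  cases l with
  | nil => simp at h
  | cons a t => simp
theorem pv_getLastD_insertBy (s : List (String × Int)) (x : String × Int)
    (hp : s.Pairwise (fun a b => b.2 ≤ a.2)) (hne : s ≠ []) :
    (PySem.List.insertBy (fun a b => decide (b.2 < a.2)) x s).getLastD ("", 0) =
      if x.2 ≤ (s.getLastD ("", 0)).2 then x else s.getLastD ("", 0) := by
  induction s with
  | nil => simp at hne
  | cons y ys ih =>
    rw [List.pairwise_cons] at hp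
    cases ys with
    | nil =>
      simp [PySem.List.insertBy]
      split_ifs with h1 h2 <;> simp_all <;> omega
    | cons z zs =>
      have hrec := ih hp.2 (by simp)
      rw [show PySem.List.insertBy (fun a b => decide (b.2 < a.2)) x (y :: z :: zs) =
        if decide (y.2 < x.2) then x :: y :: z :: zs
        else y :: PySem.List.insertBy (fun a b => decide (b.2 < a.2)) x (z :: zs) from rfl]
      have hle : ((z :: zs).getLastD ("",0)).2 ≤ y.2 := hp.1 _ (pv_getLastD_mem _ _ (by simp))
      have hnn := (by
        intro h
        have : x ∈ PySem.List.insertBy (fun a b => decide (b.2 < a.2)) x (z :: zs) :=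
          (PySem.List.mem_insertBy _ _ _ _).2 (Or.inl rfl)
        simp [h] at this : PySem.List.insertBy (fun a b => decide (b.2 < a.2)) x (z :: zs) ≠ [])
      have hYlast : (y :: z :: zs).getLastD ("",0) = (z :: zs).getLastD ("",0) :=
        pv_getLastD_cons_ne _ _ _ (by simp)
      by_cases h1 : y.2 < x.2
      · rw [if_pos (by simpa using h1), pv_getLastD_cons_ne ("",0) x _ (by simp), hYlast,
          if_neg (by omega)]
      · rw [if_neg (by simpa using h1), pv_getLastD_cons_ne ("",0) y _ hnn, hrec, hYlast]

theorem pv_stat_insertBy (s : List (String × Int)) (x : String × Int)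
    (hp : s.Pairwise (fun a b => b.2 ≤ a.2)) (hne : s ≠ []) :
    pvStat (PySem.List.insertBy (fun a b => decide (b.2 < a.2)) x s) = pvStep (pvStat s) x := by
  have hlast := pv_getLastD_insertBy s x hp hne
  obtain ⟨h, t, rfl⟩ : ∃ h t, s = h :: t := by
    cases s with
    | nil => simp at hne
    | cons a b => exact ⟨a, b, rfl⟩
  have hp' := (List.pairwise_cons.mp hp)
  cases t with
  | nil =>
    simp only [PySem.List.insertBy, pvStat, pvStep] at *
    split_ifs with h1 <;> simp_all <;> omega
  | cons z zs =>
    have hzy : z.2 ≤ h.2 := hp'.1 z (by simp)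
    have hlz : ((z :: zs).getLastD ("",0)).2 ≤ z.2 := by
      rcases List.pairwise_cons.mp hp'.2 with ⟨hz, _⟩
      cases zs with
      | nil => simp
      | cons w ws =>
        rw [pv_getLastD_cons_ne ("",0) z _ (by simp)]
        exact hz _ (pv_getLastD_mem ("",0) (w :: ws) (by simp))
    rw [show PySem.List.insertBy (fun a b => decide (b.2 < a.2)) x (h :: z :: zs) =
      if decide (h.2 < x.2) then x :: h :: z :: zs
      else h :: PySem.List.insertBy (fun a b => decide (b.2 < a.2)) x (z :: zs) from rfl] at *
    by_cases h1 : h.2 < x.2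
    · rw [if_pos (by simpa using h1)] at hlast ⊢
      simp only [pvStat, pvStep, pv_getLastD_cons_ne ("",0) x (h :: z :: zs) (by simp)] at *
      split_ifs at * <;> simp_all <;> omega
    · rw [if_neg (by simpa using h1)] at hlast ⊢
      rw [show PySem.List.insertBy (fun a b => decide (b.2 < a.2)) x (z :: zs) =
        if decide (z.2 < x.2) then x :: z :: zs
        else z :: PySem.List.insertBy (fun a b => decide (b.2 < a.2)) x zs from rfl] at *
      by_cases h2 : z.2 < x.2
      · rw [if_pos (by simpa using h2)] at hlast ⊢
        simp only [pvStat, pvStep] at *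
        split_ifs at * <;> simp_all <;> omega
      · rw [if_neg (by simpa using h2)] at hlast ⊢
        simp only [pvStat, pvStep] at *
        split_ifs at * <;> simp_all <;> omega

theorem pv_foldl_step_eq_stat_sorted (l : List (String × Int)) (h : String × Int) :
    l.foldl pvStep (h.1, h.2, h.1, h.2, false) =
      pvStat (PySem.List.sorted (h :: l) (fun p => p.2) true) := by
  induction l using List.reverseRecOn with
  | nil => rfl
  | append_singleton l' x ih =>
    have key : PySem.List.sorted (h :: (l' ++ [x])) (fun p => p.2) true =
        PySem.List.insertBy (fun a b => decide (b.2 < a.2)) x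
          (PySem.List.sorted (h :: l') (fun p => p.2) true) := by
      rw [← List.cons_append, PySem.List.sorted_rev_eq_foldl_insertBy, List.foldl_append,
        ← PySem.List.sorted_rev_eq_foldl_insertBy]
      rfl
    rw [List.foldl_append, ih, key]
    exact (pv_stat_insertBy _ x (PySem.List.sorted_pairwise_rev _ _)
      (by rw [Ne, PySem.List.sorted_eq_nil_iff]; simp)).symm

theorem find_most_and_least_digit_spec : Claim_equal_find_most_and_least_digit := by
  intro lon rie _ hpre
  unfold Spec_find_most_and_least_digit
  simp only [find_most_and_least_digit, find_most_and_least_digit_alt]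
  have hdig : (PySem.List.pyRange 0 (PySem.List.len lon) 1).foldl
      (fun acc i => acc ++ [PySem.List.pyGetD lon i ""]) [] = lon := by
    rw [PySem.List.foldl_append_singleton_eq_map (fun i => PySem.List.pyGetD lon i "")]
    simpa using PySem.List.map_pyGetD_pyRange_zero lon ""
  rw [hdig, PySem.Dict.foldl_insert_getD_add_one_eq_counter]
  have hlen : 2 ≤ (PySem.Dict.counter lon).items.length := by
    rw [PySem.Dict.items_counter, List.length_map]
    exact hpre
  obtain ⟨h, t, hitems⟩ : ∃ h t, (PySem.Dict.counter lon).items = h :: t := by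
    cases hx : (PySem.Dict.counter lon).items with
    | nil => rw [hx] at hlen; simp at hlen
    | cons a b => exact ⟨a, b, rfl⟩
  rw [hitems]
  have hfold := pv_foldl_step_eq_stat_sorted t h
  have hslen : 2 ≤ (PySem.List.sorted (h :: t) (fun p => p.2) true).length := by
    rw [PySem.List.length_sorted, ← hitems]; exact hlen
  obtain ⟨a, b, rest, hs⟩ : ∃ a b rest,
      PySem.List.sorted (h :: t) (fun p => p.2) true = a :: b :: rest := by
    cases hx : PySem.List.sorted (h :: t) (fun p => p.2) true with
    | nil => rw [hx] at hslen; simp at hslen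
    | cons a u =>
      cases u with
      | nil => rw [hx] at hslen; simp at hslen
      | cons b rest => exact ⟨a, b, rest, rfl⟩
  rw [hs] at hfold ⊢
  have hget1 : PySem.List.pyGetD (a :: b :: rest) 1 ("", 0) = b := by
    simp [PySem.List.pyGetD, PySem.List.pyGet?, PySem.List.pyIdx?]
  have hgetm1 : PySem.List.pyGetD (a :: b :: rest) (-1) ("", 0) =
      (a :: b :: rest).getLastD ("", 0) := by
    rw [PySem.List.pyGetD_neg_one (a :: b :: rest) ("", 0) (by simp),
      List.getLastD_eq_getLast?, List.getLast?_eq_some_getLast (l := a :: b :: rest) (by simp)]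
    rfl
  simp only [List.headD_cons, List.drop_succ_cons, List.drop_zero]
  rw [hfold]
  simp only [pvStat, PySem.List.pyGetD_zero_cons, hget1, hgetm1, List.length_cons, beq_iff_eq]
  norm_num
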